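-- pv_equiv track=rewrite | github.com/nageshnaik9080/problems.md | minimize_loss.py | find_min_loss
-- ===== SOURCE A (Python) =====
-- def find_min_loss(prices):
--     best_loss = None
--     answer = None
--     n = len(prices)
--
--     for i in range(n):
--         for j in range(i+1, n):
--             if prices[j] < prices[i]:
--                 loss = prices[i] - prices[j]
--                 if best_loss is None or loss < best_loss:
--                     best_loss = loss
--                     answer = (i+1, j+1, loss)
--
--     return answer
-- ===== SOURCE B (Python) =====
-- def find_min_loss(prices):
--     n = len(prices)
--     # sort indices by (price, index); minimal loss is realised at an adjacent
--     # pair of this order whose larger price sits at the smaller original index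
--     order = sorted(range(n), key=lambda k: (prices[k], k))
--     d = None
--     for t in range(n - 1):
--         a = order[t]
--         b = order[t + 1]
--         if prices[a] < prices[b] and b < a:
--             loss = prices[b] - prices[a]
--             if d is None or loss < d:
--                 d = loss
--     if d is None:
--         return None
--     # locate the lexicographically first pair (i, j) achieving loss d
--     last = {}
--     for k, p in enumerate(prices):
--         last[p] = k
--     for i in range(n):
--         if last.get(prices[i] - d, -1) > i:
--             for j in range(i + 1, n):
--                 if prices[j] == prices[i] - d:
--                     return (i + 1, j + 1, d)
--     return None
-- ===== Notes on version B (the rewrite author's own statement) =====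
-- stated objective: faster
-- what changed: Replaces the O(n^2) scan of all index pairs with a sort of indices by (price, index): the minimal loss is found among adjacent pairs of the sorted order, then the lexicographically first (i, j) achieving it is located with a last-occurrence dictionary in one linear pass.
import Mathlib
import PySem

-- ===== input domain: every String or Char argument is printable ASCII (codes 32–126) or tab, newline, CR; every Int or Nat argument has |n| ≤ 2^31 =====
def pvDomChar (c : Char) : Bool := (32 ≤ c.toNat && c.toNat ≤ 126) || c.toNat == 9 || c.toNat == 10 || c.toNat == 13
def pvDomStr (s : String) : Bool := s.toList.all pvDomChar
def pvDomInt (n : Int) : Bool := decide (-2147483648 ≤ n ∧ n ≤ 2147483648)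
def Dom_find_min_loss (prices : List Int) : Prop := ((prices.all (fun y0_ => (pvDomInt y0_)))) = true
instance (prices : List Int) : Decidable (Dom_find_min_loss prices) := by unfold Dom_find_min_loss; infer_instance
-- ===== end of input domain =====

-- B replaces A's O(n^2) all-pairs scan by sorting the indices by (price, index) and taking
-- the minimal loss over adjacent sorted pairs, then locating the lexicographically first
-- pair via a last-occurrence dictionary (objective: faster).

-- ===== PORT A =====
def find_min_loss (prices : List Int) : Option (List Int) :=
  let n : Int := prices.length
  let st :=
    (PySem.List.pyRange 0 n 1).foldl (fun st i =>
      (PySem.List.pyRange (i + 1) n 1).foldl (fun st j =>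
        if PySem.List.pyGetD prices j 0 < PySem.List.pyGetD prices i 0 then
          let loss := PySem.List.pyGetD prices i 0 - PySem.List.pyGetD prices j 0
          match st.1 with
          | none => (some loss, some [i + 1, j + 1, loss])
          | some b => if loss < b then (some loss, some [i + 1, j + 1, loss]) else st
        else st) st)
      ((none : Option Int), (none : Option (List Int)))
  st.2

-- ===== PORT B =====
-- inner 'for j in range(i+1, n): if prices[j] == prices[i] - d: return (i+1, j+1, d)'
def pvFindJ (prices : List Int) (target i d : Int) : List Int → Option (List Int)
  | [] => none
  | j :: rest =>
    if PySem.List.pyGetD prices j 0 = target then some [i + 1, j + 1, d]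
    else pvFindJ prices target i d rest

-- outer 'for i in range(n): if last.get(prices[i] - d, -1) > i: <inner loop>'
def pvFindI (prices : List Int) (last : PySem.Dict Int Int) (d n : Int) :
    List Int → Option (List Int)
  | [] => none
  | i :: rest =>
    if last.getD (PySem.List.pyGetD prices i 0 - d) (-1) > i then
      match pvFindJ prices (PySem.List.pyGetD prices i 0 - d) i d
          (PySem.List.pyRange (i + 1) n 1) with
      | some r => some r
      | none => pvFindI prices last d n rest
    else pvFindI prices last d n rest

def find_min_loss_alt (prices : List Int) : Option (List Int) :=
  let n : Int := prices.length
  let order := PySem.List.sorted2 (PySem.List.pyRange 0 n 1)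
    (fun k => PySem.List.pyGetD prices k 0) (fun k => k) false
  let d :=
    (PySem.List.pyRange 0 (n - 1) 1).foldl (fun d t =>
      let a := PySem.List.pyGetD order t 0
      let b := PySem.List.pyGetD order (t + 1) 0
      if PySem.List.pyGetD prices a 0 < PySem.List.pyGetD prices b 0 ∧ b < a then
        let loss := PySem.List.pyGetD prices b 0 - PySem.List.pyGetD prices a 0
        match d with
        | none => some loss
        | some m => if loss < m then some loss else d
      else d) none
  match d with
  | none => none
  | some dv =>
    let last := (PySem.List.enumerate prices 0).foldl
      (fun dct kp => dct.insert kp.2 kp.1) PySem.Dict.empty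
    pvFindI prices last dv n (PySem.List.pyRange 0 n 1)

-- ===== PRECONDITION & SPEC =====
def Spec_find_min_loss (prices : List Int) (out : Option (List Int)) : Prop := out = find_min_loss_alt prices
instance (prices : List Int) (out : Option (List Int)) : Decidable (Spec_find_min_loss prices out) := by unfold Spec_find_min_loss; infer_instance

-- ===== CLAIM (what is proved, stated in full; the proofs are below) =====
def Claim_equal_find_min_loss : Prop := ∀ (prices : List Int), Dom_find_min_loss prices → Spec_find_min_loss prices (find_min_loss prices)

-- ===== LEMMAS AND PROOFS =====

-- ---- shared abbreviations (proof layer) ----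
def pvPrice (ps : List Int) (k : Int) : Int := PySem.List.pyGetD ps k 0

def pvPairs (ps : List Int) : List (Int × Int) :=
  (PySem.List.pyRange 0 (ps.length : Int) 1).flatMap (fun i =>
    (PySem.List.pyRange (i + 1) (ps.length : Int) 1).map (fun j => (i, j)))

def pvLV (ps : List Int) : List (Int × (Int × Int)) :=
  ((pvPairs ps).filter (fun p => decide (pvPrice ps p.2 < pvPrice ps p.1))).map
    (fun p => (pvPrice ps p.1 - pvPrice ps p.2, p))

def pvEnc (e : Int × (Int × Int)) : List Int := [e.2.1 + 1, e.2.2 + 1, e.1]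

-- ---- first-minimum fold machinery ----
def pvFmStep {α : Type} : Option (Int × α) → (Int × α) → Option (Int × α) := fun acc e =>
  match acc with
  | none => some e
  | some b => if e.1 < b.1 then some e else acc

def pvFm {α : Type} (xs : List (Int × α)) : Option (Int × α) := xs.foldl pvFmStep none

theorem pvFm_append {α : Type} (xs : List (Int × α)) (e : Int × α) :
    pvFm (xs ++ [e]) = pvFmStep (pvFm xs) e := by
  simp [pvFm]

theorem pvFm_eq_none_iff {α : Type} (xs : List (Int × α)) : pvFm xs = none ↔ xs = [] := by
  induction xs using List.reverseRecOn with
  | nil => simp [pvFm]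
  | append_singleton xs e ih =>
    rw [pvFm_append]
    cases h : pvFm xs with
    | none => simp [pvFmStep]
    | some b =>
      simp only [pvFmStep]
      constructor
      · intro hc; split at hc <;> simp_all
      · intro hc; simp at hc

theorem pvFm_min {α : Type} (xs : List (Int × α)) (e : Int × α) (h : pvFm xs = some e) :
    e ∈ xs ∧ ∀ e' ∈ xs, e.1 ≤ e'.1 := by
  induction xs using List.reverseRecOn generalizing e with
  | nil => simp [pvFm] at h
  | append_singleton xs x ih =>
    rw [pvFm_append] at h
    cases hx : pvFm xs with
    | none =>
      rw [hx] at h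
      have hnil : xs = [] := (pvFm_eq_none_iff xs).mp hx
      simp only [pvFmStep] at h
      subst hnil
      have he : e = x := by simpa using h.symm
      subst he
      simp
    | some b =>
      rw [hx] at h
      obtain ⟨hb, hmin⟩ := ih b hx
      simp only [pvFmStep] at h
      split at h
      · rename_i hlt
        have he : e = x := by simpa using h.symm
        subst he
        refine ⟨by simp, ?_⟩
        intro e' he'
        rcases List.mem_append.mp he' with h1 | h1
        · exact le_of_lt (lt_of_lt_of_le hlt (hmin e' h1))
        · simp at h1; subst h1; exact le_refl _
      · rename_i hlt
        have he : e = b := by simpa using h.symm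
        subst he
        refine ⟨List.mem_append.mpr (Or.inl hb), ?_⟩
        intro e' he'
        rcases List.mem_append.mp he' with h1 | h1
        · exact hmin e' h1
        · simp at h1; subst h1; omega

theorem pvFm_first {α : Type} (xs : List (Int × α)) (e : Int × α) (h : pvFm xs = some e) :
    ∃ k, ∃ hk : k < xs.length, xs[k] = e ∧ ∀ m, (hm : m < k) → e.1 < (xs[m]'(by omega)).1 := by
  induction xs using List.reverseRecOn generalizing e with
  | nil => simp [pvFm] at h
  | append_singleton xs x ih =>
    rw [pvFm_append] at h
    cases hx : pvFm xs with
    | none =>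
      rw [hx] at h
      have hnil : xs = [] := (pvFm_eq_none_iff xs).mp hx
      simp only [pvFmStep] at h
      subst hnil
      refine ⟨0, by simp, by simpa using h, by omega⟩
    | some b =>
      rw [hx] at h
      obtain ⟨hb, hmin⟩ := pvFm_min xs b hx
      simp only [pvFmStep] at h
      split at h
      · rename_i hlt
        have he : e = x := by simpa using h.symm
        subst he
        refine ⟨xs.length, by simp, by simp, ?_⟩
        intro m hm
        have hmem : xs[m]'(by omega) ∈ xs := List.getElem_mem _
        have := hmin _ hmem
        rw [List.getElem_append_left (by omega)]
        omega
      · rename_i hlt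
        have he : e = b := by simpa using h.symm
        obtain ⟨k, hk, hke, hfirst⟩ := ih b hx
        subst he
        refine ⟨k, by simp; omega, ?_, ?_⟩
        · rw [List.getElem_append_left hk]; exact hke
        · intro m hm
          rw [List.getElem_append_left (by omega)]
          exact hfirst m hm

-- ---- running-minimum fold machinery ----
def pvMStep : Option Int → Int → Option Int := fun acc l =>
  match acc with
  | none => some l
  | some b => if l < b then some l else acc

def pvMin (xs : List Int) : Option Int := xs.foldl pvMStep none

theorem pvMin_append (xs : List Int) (x : Int) : pvMin (xs ++ [x]) = pvMStep (pvMin xs) x := by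
  simp [pvMin]

theorem pvMin_eq_none_iff (xs : List Int) : pvMin xs = none ↔ xs = [] := by
  induction xs using List.reverseRecOn with
  | nil => simp [pvMin]
  | append_singleton xs x ih =>
    rw [pvMin_append]
    cases h : pvMin xs with
    | none => simp [pvMStep]
    | some b =>
      simp only [pvMStep]
      constructor
      · intro hc; split at hc <;> simp_all
      · intro hc; simp at hc

theorem pvMin_min (xs : List Int) (m : Int) (h : pvMin xs = some m) :
    m ∈ xs ∧ ∀ y ∈ xs, m ≤ y := by
  induction xs using List.reverseRecOn generalizing m with
  | nil => simp [pvMin] at h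
  | append_singleton xs x ih =>
    rw [pvMin_append] at h
    cases hx : pvMin xs with
    | none =>
      rw [hx] at h
      have hnil : xs = [] := (pvMin_eq_none_iff xs).mp hx
      simp only [pvMStep] at h
      subst hnil
      have he : m = x := by simpa using h.symm
      subst he
      simp
    | some b =>
      rw [hx] at h
      obtain ⟨hb, hmin⟩ := ih b hx
      simp only [pvMStep] at h
      split at h
      · rename_i hlt
        have he : m = x := by simpa using h.symm
        subst he
        refine ⟨by simp, ?_⟩
        intro y hy
        rcases List.mem_append.mp hy with h1 | h1
        · exact le_of_lt (lt_of_lt_of_le hlt (hmin y h1))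
        · simp at h1; subst h1; exact le_refl _
      · rename_i hlt
        have he : m = b := by simpa using h.symm
        subst he
        refine ⟨List.mem_append.mpr (Or.inl hb), ?_⟩
        intro y hy
        rcases List.mem_append.mp hy with h1 | h1
        · exact hmin y h1
        · simp at h1; subst h1; omega

-- ---- characterization of A ----
def pvStepA (ps : List Int) (st : Option Int × Option (List Int)) (p : Int × Int) :
    Option Int × Option (List Int) :=
  if PySem.List.pyGetD ps p.2 0 < PySem.List.pyGetD ps p.1 0 then
    let loss := PySem.List.pyGetD ps p.1 0 - PySem.List.pyGetD ps p.2 0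
    match st.1 with
    | none => (some loss, some [p.1 + 1, p.2 + 1, loss])
    | some b => if loss < b then (some loss, some [p.1 + 1, p.2 + 1, loss]) else st
  else st

def pvGamma (s : Option (Int × (Int × Int))) : Option Int × Option (List Int) :=
  (s.map (·.1), s.map pvEnc)

theorem pvA_fold (ps : List Int) (L : List (Int × Int)) (s : Option (Int × (Int × Int))) :
    L.foldl (pvStepA ps) (pvGamma s) =
      pvGamma (((L.filter (fun p => decide (pvPrice ps p.2 < pvPrice ps p.1))).map
        (fun p => (pvPrice ps p.1 - pvPrice ps p.2, p))).foldl pvFmStep s) := by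
  induction L generalizing s with
  | nil => rfl
  | cons p L ih =>
    by_cases hv : pvPrice ps p.2 < pvPrice ps p.1
    · have hstep : pvStepA ps (pvGamma s) p =
          pvGamma (pvFmStep s (pvPrice ps p.1 - pvPrice ps p.2, p)) := by
        cases s with
        | none =>
          have hv' : PySem.List.pyGetD ps p.2 0 < PySem.List.pyGetD ps p.1 0 := hv
          simp [pvStepA, pvGamma, pvFmStep, pvEnc, pvPrice, if_pos hv']
        | some b =>
          have hv' : PySem.List.pyGetD ps p.2 0 < PySem.List.pyGetD ps p.1 0 := hv
          simp only [pvStepA, pvGamma, pvFmStep, pvEnc, pvPrice, if_pos hv', Option.map_some]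
          by_cases hb : PySem.List.pyGetD ps p.1 0 - PySem.List.pyGetD ps p.2 0 < b.1
          · simp only [if_pos hb]; rfl
          · simp only [if_neg hb]; rfl
      simp only [List.foldl_cons, hstep, List.filter_cons, decide_eq_true_eq, if_pos hv,
        List.map_cons]
      exact ih _
    · have hstep : pvStepA ps (pvGamma s) p = pvGamma s := by
        have hv' : ¬ PySem.List.pyGetD ps p.2 0 < PySem.List.pyGetD ps p.1 0 := hv
        simp [pvStepA, if_neg hv']
      simp only [List.foldl_cons, hstep, List.filter_cons, decide_eq_true_eq, if_neg hv]
      exact ih _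

theorem pvA_char (ps : List Int) : find_min_loss ps = (pvFm (pvLV ps)).map pvEnc := by
  have h1 : find_min_loss ps = ((pvPairs ps).foldl (pvStepA ps) (pvGamma none)).2 := by
    simp only [find_min_loss, pvPairs, List.foldl_flatMap, List.foldl_map]
    rfl
  rw [h1, pvA_fold]
  rfl

-- ---- the sorted order ----
def pvOrd (ps : List Int) : List Int :=
  PySem.List.sorted2 (PySem.List.pyRange 0 (ps.length : Int) 1)
    (fun k => PySem.List.pyGetD ps k 0) (fun k => k) false

theorem pvSorted2_eq_sorted_lex {α : Type} (xs : List α) (k1 k2 : α → Int) :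
    PySem.List.sorted2 xs k1 k2 false =
      PySem.List.sorted xs (fun x => toLex (k1 x, k2 x)) false := by
  have hb : (fun a b => decide (k1 a < k1 b) || (!decide (k1 b < k1 a) && decide (k2 a < k2 b)))
      = (fun a b : α => decide (toLex (k1 a, k2 a) < toLex (k1 b, k2 b))) := by
    funext a b
    rcases lt_trichotomy (k1 a) (k1 b) with h | h | h <;>
      rcases lt_trichotomy (k2 a) (k2 b) with h2 | h2 | h2 <;>
        simp [Prod.Lex.toLex_lt_toLex, h, h2] <;> omega
  simp only [PySem.List.sorted2, PySem.List.sorted, Bool.false_eq_true, if_false, hb]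

theorem pvOrd_eq_sorted (ps : List Int) :
    pvOrd ps = PySem.List.sorted (PySem.List.pyRange 0 (ps.length : Int) 1)
      (fun k => toLex (PySem.List.pyGetD ps k 0, k)) false :=
  pvSorted2_eq_sorted_lex _ _ _

theorem pvOrd_length (ps : List Int) : (pvOrd ps).length = ps.length := by
  rw [pvOrd_eq_sorted, PySem.List.length_sorted, PySem.List.length_pyRange_one]
  omega

theorem pvOrd_mem (ps : List Int) (k : Int) :
    k ∈ pvOrd ps ↔ 0 ≤ k ∧ k < (ps.length : Int) := by
  rw [pvOrd_eq_sorted, PySem.List.mem_sorted, PySem.List.mem_pyRange_one]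

theorem pvOrd_nodup (ps : List Int) : (pvOrd ps).Nodup := by
  rw [pvOrd_eq_sorted]
  exact (PySem.List.sorted_perm _ _ _).nodup_iff.mpr (PySem.List.nodup_pyRange_one _ _)

theorem pvOrd_pos (ps : List Int) (p q : Nat) (hp : p < (pvOrd ps).length)
    (hq : q < (pvOrd ps).length) (hpq : p < q) :
    pvPrice ps ((pvOrd ps)[p]) < pvPrice ps ((pvOrd ps)[q]) ∨
      (pvPrice ps ((pvOrd ps)[p]) = pvPrice ps ((pvOrd ps)[q]) ∧ (pvOrd ps)[p] < (pvOrd ps)[q]) := by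
  have hpw := PySem.List.sorted_pairwise (PySem.List.pyRange 0 (ps.length : Int) 1)
    (fun k => toLex (PySem.List.pyGetD ps k 0, k))
  rw [← pvOrd_eq_sorted] at hpw
  have h1 := List.pairwise_iff_getElem.mp hpw p q hp hq hpq
  have hne : (pvOrd ps)[p] ≠ (pvOrd ps)[q] := by
    intro hEq
    exact absurd ((pvOrd_nodup ps).getElem_inj_iff.mp hEq) (by omega)
  simp only [Prod.Lex.toLex_le_toLex] at h1
  rcases h1 with h | ⟨h, h2⟩
  · exact Or.inl h
  · refine Or.inr ⟨h, ?_⟩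
    rcases lt_or_eq_of_le h2 with h3 | h3
    · exact h3
    · exact absurd h3 hne

-- ---- the adjacent-candidate list and B's d-loop ----
def pvOrdAt (ps : List Int) (t : Int) : Int := PySem.List.pyGetD (pvOrd ps) t 0

def pvCands (ps : List Int) : List Int :=
  ((PySem.List.pyRange 0 ((ps.length : Int) - 1) 1).filter (fun t =>
    decide (pvPrice ps (pvOrdAt ps t) < pvPrice ps (pvOrdAt ps (t + 1)) ∧
      pvOrdAt ps (t + 1) < pvOrdAt ps t))).map
    (fun t => pvPrice ps (pvOrdAt ps (t + 1)) - pvPrice ps (pvOrdAt ps t))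

theorem pvOrdAt_eq (ps : List Int) (t : Int) (h0 : 0 ≤ t) (h1 : t < (ps.length : Int)) :
    pvOrdAt ps t = (pvOrd ps)[t.toNat]'(by rw [pvOrd_length]; omega) := by
  unfold pvOrdAt
  exact PySem.List.pyGetD_eq_getElem _ _ h0 (by rw [pvOrd_length]; omega)

theorem pvCands_mem (ps : List Int) (c : Int) :
    c ∈ pvCands ps ↔ ∃ t : Int, 0 ≤ t ∧ t < (ps.length : Int) - 1 ∧
      pvPrice ps (pvOrdAt ps t) < pvPrice ps (pvOrdAt ps (t + 1)) ∧
      pvOrdAt ps (t + 1) < pvOrdAt ps t ∧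
      c = pvPrice ps (pvOrdAt ps (t + 1)) - pvPrice ps (pvOrdAt ps t) := by
  simp only [pvCands, List.mem_map, List.mem_filter, PySem.List.mem_pyRange_one,
    decide_eq_true_eq]
  constructor
  · rintro ⟨t, ⟨⟨h0, h1⟩, h2, h3⟩, rfl⟩
    exact ⟨t, h0, h1, h2, h3, rfl⟩
  · rintro ⟨t, h0, h1, h2, h3, rfl⟩
    exact ⟨t, ⟨⟨h0, h1⟩, h2, h3⟩, rfl⟩

theorem pvPairs_mem (ps : List Int) (p : Int × Int) :
    p ∈ pvPairs ps ↔ 0 ≤ p.1 ∧ p.1 < p.2 ∧ p.2 < (ps.length : Int) := by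
  simp only [pvPairs, List.mem_flatMap, List.mem_map, PySem.List.mem_pyRange_one]
  constructor
  · rintro ⟨i, ⟨hi0, hin⟩, j, ⟨hj1, hj2⟩, rfl⟩
    exact ⟨hi0, by omega, hj2⟩
  · rintro ⟨h1, h2, h3⟩
    exact ⟨p.1, ⟨h1, by omega⟩, p.2, ⟨by omega, h3⟩, rfl⟩

theorem pvLV_mem (ps : List Int) (e : Int × (Int × Int)) :
    e ∈ pvLV ps ↔ e.1 = pvPrice ps e.2.1 - pvPrice ps e.2.2 ∧ 0 ≤ e.2.1 ∧ e.2.1 < e.2.2 ∧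
      e.2.2 < (ps.length : Int) ∧ pvPrice ps e.2.2 < pvPrice ps e.2.1 := by
  simp only [pvLV, List.mem_map, List.mem_filter, pvPairs_mem, decide_eq_true_eq]
  constructor
  · rintro ⟨p, ⟨⟨h1, h2, h3⟩, h4⟩, rfl⟩
    exact ⟨rfl, h1, h2, h3, h4⟩
  · rintro ⟨h0, h1, h2, h3, h4⟩
    refine ⟨e.2, ⟨⟨h1, h2, h3⟩, h4⟩, ?_⟩
    rw [← h0]

theorem pvCands_sub (ps : List Int) (c : Int) (h : c ∈ pvCands ps) :
    ∃ e ∈ pvLV ps, e.1 = c := by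
  obtain ⟨t, h0, h1, h2, h3, rfl⟩ := (pvCands_mem ps c).mp h
  have hb : pvOrdAt ps (t + 1) ∈ pvOrd ps := by
    rw [pvOrdAt_eq ps (t + 1) (by omega) (by omega)]
    exact List.getElem_mem _
  have ha : pvOrdAt ps t ∈ pvOrd ps := by
    rw [pvOrdAt_eq ps t h0 (by omega)]
    exact List.getElem_mem _
  rw [pvOrd_mem] at hb ha
  refine ⟨(pvPrice ps (pvOrdAt ps (t + 1)) - pvPrice ps (pvOrdAt ps t),
    (pvOrdAt ps (t + 1), pvOrdAt ps t)), ?_, rfl⟩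
  rw [pvLV_mem]
  dsimp only
  exact ⟨rfl, by omega, h3, by omega, h2⟩

theorem pvExchange_aux (ps : List Int) :
    ∀ gap p q, (hp : p < (pvOrd ps).length) → (hq : q < (pvOrd ps).length) → p < q →
      q - p ≤ gap →
      pvPrice ps ((pvOrd ps)[p]) < pvPrice ps ((pvOrd ps)[q]) →
      (pvOrd ps)[q] < (pvOrd ps)[p] →
      ∃ c ∈ pvCands ps, c ≤ pvPrice ps ((pvOrd ps)[q]) - pvPrice ps ((pvOrd ps)[p])
  | 0 => by intro p q hp hq h1 h2; omega
  | gap + 1 => by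
    intro p q hp hq hpq hgap hpr hidx
    by_cases hadj : q = p + 1
    · subst hadj
      refine ⟨pvPrice ps ((pvOrd ps)[p + 1]) - pvPrice ps ((pvOrd ps)[p]), ?_, le_refl _⟩
      rw [pvCands_mem]
      have hlen : (pvOrd ps).length = ps.length := pvOrd_length ps
      refine ⟨(p : Int), by omega, by omega, ?_⟩
      rw [pvOrdAt_eq ps (p : Int) (by omega) (by omega),
        show ((p : Int) + 1) = ((p + 1 : Nat) : Int) by push_cast; ring,
        pvOrdAt_eq ps ((p + 1 : Nat) : Int) (by omega) (by omega)]
      simp only [Int.toNat_natCast]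
      exact ⟨hpr, hidx, trivial⟩
    · have hm : p + 1 < (pvOrd ps).length := by omega
      have o1 := pvOrd_pos ps p (p + 1) hp hm (by omega)
      have o2 := pvOrd_pos ps (p + 1) q hm hq (by omega)
      have hne1 : (pvOrd ps)[p + 1] ≠ (pvOrd ps)[p] := by
        intro hEq
        have := (pvOrd_nodup ps).getElem_inj_iff.mp hEq
        omega
      by_cases hc1 : pvPrice ps ((pvOrd ps)[p]) < pvPrice ps ((pvOrd ps)[p + 1]) ∧
          (pvOrd ps)[p + 1] < (pvOrd ps)[p]
      · obtain ⟨c, hcmem, hcle⟩ :=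
          pvExchange_aux ps gap p (p + 1) hp hm (by omega) (by omega) hc1.1 hc1.2
        refine ⟨c, hcmem, ?_⟩
        have hzq : pvPrice ps ((pvOrd ps)[p + 1]) ≤ pvPrice ps ((pvOrd ps)[q]) := by
          rcases o2 with h | ⟨h, _⟩ <;> omega
        have hcle' : c ≤ pvPrice ps ((pvOrd ps)[p + 1]) - pvPrice ps ((pvOrd ps)[p]) := hcle
        omega
      · have hpz : (pvOrd ps)[p] < (pvOrd ps)[p + 1] := by
          rcases o1 with h | ⟨h, h2⟩
          · have h3 : ¬ ((pvOrd ps)[p + 1] < (pvOrd ps)[p]) := fun hlt => hc1 ⟨h, hlt⟩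
            omega
          · omega
        have hzq : pvPrice ps ((pvOrd ps)[p + 1]) < pvPrice ps ((pvOrd ps)[q]) ∧
            (pvOrd ps)[q] < (pvOrd ps)[p + 1] := by
          rcases o1 with h1 | ⟨h1a, h1b⟩ <;> rcases o2 with h2 | ⟨h2a, h2b⟩ <;>
            exact ⟨by omega, by omega⟩
        obtain ⟨c, hcmem, hcle⟩ :=
          pvExchange_aux ps gap (p + 1) q hm hq (by omega) (by omega) hzq.1 hzq.2
        refine ⟨c, hcmem, ?_⟩
        have hpz2 : pvPrice ps ((pvOrd ps)[p]) ≤ pvPrice ps ((pvOrd ps)[p + 1]) := by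
          rcases o1 with h | ⟨h, _⟩ <;> omega
        have hcle' : c ≤ pvPrice ps ((pvOrd ps)[q]) - pvPrice ps ((pvOrd ps)[p + 1]) := hcle
        omega

theorem pvExchange (ps : List Int) (e : Int × (Int × Int)) (he : e ∈ pvLV ps) :
    ∃ c ∈ pvCands ps, c ≤ e.1 := by
  obtain ⟨hval, h1, h2, h3, h4⟩ := (pvLV_mem ps e).mp he
  have hi : e.2.1 ∈ pvOrd ps := (pvOrd_mem ps _).mpr ⟨h1, by omega⟩
  have hj : e.2.2 ∈ pvOrd ps := (pvOrd_mem ps _).mpr ⟨by omega, h3⟩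
  obtain ⟨q, hq, hqe⟩ := List.mem_iff_getElem.mp hi
  obtain ⟨p, hp, hpe⟩ := List.mem_iff_getElem.mp hj
  have hpq : p < q := by
    rcases lt_trichotomy p q with h | h | h
    · exact h
    · exfalso
      subst h
      have heq : e.2.1 = e.2.2 := by rw [← hqe, ← hpe]
      omega
    · exfalso
      have := pvOrd_pos ps q p hq hp h
      rw [hqe, hpe] at this
      omega
  obtain ⟨c, hcmem, hcle⟩ := pvExchange_aux ps (q - p) p q hp hq hpq (le_refl _)
    (by rw [hqe, hpe]; omega) (by rw [hqe, hpe]; omega)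
  refine ⟨c, hcmem, ?_⟩
  rw [hqe, hpe] at hcle
  omega

-- ---- lex order on pairs ----
def pvLexLt (p q : Int × Int) : Prop := p.1 < q.1 ∨ (p.1 = q.1 ∧ p.2 < q.2)

theorem pvPairs_pairwise (ps : List Int) : (pvPairs ps).Pairwise pvLexLt := by
  unfold pvPairs
  rw [List.pairwise_flatMap]
  constructor
  · intro i _
    rw [List.pairwise_map]
    apply (PySem.List.pairwise_lt_pyRange_one _ _).imp
    intro a b hab
    exact Or.inr ⟨rfl, hab⟩
  · apply (PySem.List.pairwise_lt_pyRange_one _ _).imp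
    intro i1 i2 h12 x hx y hy
    obtain ⟨j1, _, rfl⟩ := List.mem_map.mp hx
    obtain ⟨j2, _, rfl⟩ := List.mem_map.mp hy
    exact Or.inl h12

theorem pvLV_pairwise (ps : List Int) : (pvLV ps).Pairwise (fun e e' => pvLexLt e.2 e'.2) := by
  unfold pvLV
  rw [List.pairwise_map]
  exact (pvPairs_pairwise ps).filter _

theorem pvFm_lex_least (ps : List Int) (e : Int × (Int × Int))
    (h : pvFm (pvLV ps) = some e) :
    ∀ e' ∈ pvLV ps, e'.1 = e.1 → e.2 = e'.2 ∨ pvLexLt e.2 e'.2 := by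
  intro e' he' hval
  obtain ⟨k, hk, hke, hfirst⟩ := pvFm_first _ _ h
  obtain ⟨k', hk', hke'⟩ := List.mem_iff_getElem.mp he'
  rcases lt_trichotomy k' k with hlt | heq | hgt
  · have := hfirst k' hlt
    rw [hke'] at this
    omega
  · subst heq
    rw [hke] at hke'
    rw [hke']
    exact Or.inl rfl
  · right
    have := List.pairwise_iff_getElem.mp (pvLV_pairwise ps) k k' hk hk' hgt
    rw [hke, hke'] at this
    exact this

-- ---- the last-occurrence dictionary ----
def pvLast (ps : List Int) : PySem.Dict Int Int :=
  (PySem.List.enumerate ps 0).foldl (fun dct kp => dct.insert kp.2 kp.1) PySem.Dict.empty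

theorem pvPrice_append_left (ps : List Int) (x : Int) (k : Int) (h0 : 0 ≤ k)
    (h1 : k < (ps.length : Int)) : pvPrice (ps ++ [x]) k = pvPrice ps k := by
  unfold pvPrice
  rw [PySem.List.pyGetD_eq_getElem _ _ h0 (by simp; omega),
    PySem.List.pyGetD_eq_getElem _ _ h0 (by omega)]
  exact List.getElem_append_left (by omega)

theorem pvPrice_append_right (ps : List Int) (x : Int) :
    pvPrice (ps ++ [x]) (ps.length : Int) = x := by
  unfold pvPrice
  rw [PySem.List.pyGetD_eq_getElem _ _ (by omega) (by simp)]
  simp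

theorem pvLast_append (ps : List Int) (x : Int) :
    pvLast (ps ++ [x]) = (pvLast ps).insert x (ps.length : Int) := by
  unfold pvLast
  rw [PySem.List.enumerate_append, List.foldl_append]
  have h : PySem.List.enumerate [x] (0 + (ps.length : Int)) = [((ps.length : Int), x)] := by
    simp [PySem.List.enumerate]
  rw [h]
  rfl

theorem pvLast_spec (ps : List Int) (v : Int) :
    ((pvLast ps).getD v (-1) = -1 ∧ ∀ k : Int, 0 ≤ k → k < (ps.length : Int) → pvPrice ps k ≠ v) ∨
      (∃ k : Int, 0 ≤ k ∧ k < (ps.length : Int) ∧ (pvLast ps).getD v (-1) = k ∧ pvPrice ps k = v ∧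
        ∀ m : Int, k < m → m < (ps.length : Int) → pvPrice ps m ≠ v) := by
  induction ps using List.reverseRecOn with
  | nil =>
    left
    constructor
    · rfl
    · intro k h0 h1; simp at h1; omega
  | append_singleton ps x ih =>
    rw [pvLast_append, PySem.Dict.getD_insert]
    by_cases hvx : v = x
    · right
      refine ⟨(ps.length : Int), by omega,
        by simp only [List.length_append, List.length_cons, List.length_nil]; push_cast; omega,
        by rw [if_pos hvx], ?_, ?_⟩
      · rw [pvPrice_append_right, hvx]
      · intro m hm1 hm2
        simp at hm2
        omega
    · rw [if_neg hvx]
      rcases ih with ⟨h1, h2⟩ | ⟨k, hk0, hk1, hk2, hk3, hk4⟩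
      · left
        refine ⟨h1, ?_⟩
        intro k h0 hlen
        simp only [List.length_append, List.length_cons, List.length_nil] at hlen
        by_cases hk : k < (ps.length : Int)
        · rw [pvPrice_append_left ps x k h0 hk]
          exact h2 k h0 hk
        · have : k = (ps.length : Int) := by push_cast at hlen; omega
          rw [this, pvPrice_append_right]
          exact fun h => hvx h.symm
      · right
        refine ⟨k, hk0,
          by simp only [List.length_append, List.length_cons, List.length_nil]; push_cast; omega,
          hk2, ?_, ?_⟩
        · rw [pvPrice_append_left ps x k hk0 hk1]; exact hk3
        · intro m hm1 hm2
          simp only [List.length_append, List.length_cons, List.length_nil] at hm2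
          by_cases hm : m < (ps.length : Int)
          · rw [pvPrice_append_left ps x m (by omega) hm]
            exact hk4 m hm1 hm
          · have : m = (ps.length : Int) := by push_cast at hm2; omega
            rw [this, pvPrice_append_right]
            exact fun h => hvx h.symm

theorem pvGuard_iff (ps : List Int) (v i : Int) (hi : 0 ≤ i) :
    (pvLast ps).getD v (-1) > i ↔ ∃ j : Int, i < j ∧ j < (ps.length : Int) ∧ pvPrice ps j = v := by
  rcases pvLast_spec ps v with ⟨h1, h2⟩ | ⟨k, hk0, hk1, hk2, hk3, hk4⟩
  · rw [h1]
    constructor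
    · omega
    · rintro ⟨j, hj1, hj2, hj3⟩
      exact absurd hj3 (h2 j (by omega) hj2)
  · rw [hk2]
    constructor
    · intro h
      exact ⟨k, h, hk1, hk3⟩
    · rintro ⟨j, hj1, hj2, hj3⟩
      by_contra h
      exact absurd hj3 (hk4 j (by omega) hj2)

-- ---- first-hit lemmas for B's final loops ----
theorem pvFindJ_hit (ps : List Int) (target i d j : Int) :
    ∀ a : Int, a ≤ j → j < (ps.length : Int) → pvPrice ps j = target →
      (∀ x : Int, a ≤ x → x < j → pvPrice ps x ≠ target) →
      pvFindJ ps target i d (PySem.List.pyRange a (ps.length : Int) 1) = some [i + 1, j + 1, d] := by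
  have main : ∀ (fuel : Nat) (a : Int), ((ps.length : Int) - a).toNat ≤ fuel → a ≤ j →
      j < (ps.length : Int) → pvPrice ps j = target →
      (∀ x : Int, a ≤ x → x < j → pvPrice ps x ≠ target) →
      pvFindJ ps target i d (PySem.List.pyRange a (ps.length : Int) 1) = some [i + 1, j + 1, d] := by
    intro fuel
    induction fuel with
    | zero => intro a hf h1 h2 h3 h4; omega
    | succ f ihf =>
      intro a hf h1 h2 h3 h4
      rw [PySem.List.pyRange_one_cons (by omega : a < (ps.length : Int))]
      by_cases hae : a = j
      · subst hae
        simp only [pvFindJ]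
        rw [if_pos (show PySem.List.pyGetD ps a 0 = target from h3)]
      · have halt : a < j := by omega
        simp only [pvFindJ]
        rw [if_neg (show ¬ PySem.List.pyGetD ps a 0 = target from h4 a (le_refl a) halt)]
        exact ihf (a + 1) (by omega) (by omega) h2 h3
          (fun x hx1 hx2 => h4 x (by omega) hx2)
  intro a
  exact main (((ps.length : Int) - a).toNat) a (le_refl _)

theorem pvFindI_hit (ps : List Int) (last : PySem.Dict Int Int) (d i0 : Int) (r : List Int) :
    ∀ a : Int, a ≤ i0 → i0 < (ps.length : Int) →
      (∀ x : Int, a ≤ x → x < i0 → ¬ (last.getD (pvPrice ps x - d) (-1) > x)) →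
      last.getD (pvPrice ps i0 - d) (-1) > i0 →
      pvFindJ ps (pvPrice ps i0 - d) i0 d (PySem.List.pyRange (i0 + 1) (ps.length : Int) 1) = some r →
      pvFindI ps last d (ps.length : Int) (PySem.List.pyRange a (ps.length : Int) 1) = some r := by
  have main : ∀ (fuel : Nat) (a : Int), ((ps.length : Int) - a).toNat ≤ fuel → a ≤ i0 →
      i0 < (ps.length : Int) →
      (∀ x : Int, a ≤ x → x < i0 → ¬ (last.getD (pvPrice ps x - d) (-1) > x)) →
      last.getD (pvPrice ps i0 - d) (-1) > i0 →
      pvFindJ ps (pvPrice ps i0 - d) i0 d (PySem.List.pyRange (i0 + 1) (ps.length : Int) 1) = some r →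
      pvFindI ps last d (ps.length : Int) (PySem.List.pyRange a (ps.length : Int) 1) = some r := by
    intro fuel
    induction fuel with
    | zero => intro a hf h1 h2 h3 h4 h5; omega
    | succ f ihf =>
      intro a hf h1 h2 h3 h4 h5
      rw [PySem.List.pyRange_one_cons (by omega : a < (ps.length : Int))]
      by_cases hae : a = i0
      · subst hae
        simp only [pvFindI]
        rw [if_pos (show last.getD (PySem.List.pyGetD ps a 0 - d) (-1) > a from h4),
          show pvFindJ ps (PySem.List.pyGetD ps a 0 - d) a d
              (PySem.List.pyRange (a + 1) (ps.length : Int) 1) = some r from h5]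
      · have halt : a < i0 := by omega
        simp only [pvFindI]
        rw [if_neg (show ¬ (last.getD (PySem.List.pyGetD ps a 0 - d) (-1) > a) from
          h3 a (le_refl a) halt)]
        exact ihf (a + 1) (by omega) (by omega) h2
          (fun x hx1 hx2 => h3 x (by omega) hx2) h4 h5
  intro a
  exact main (((ps.length : Int) - a).toNat) a (le_refl _)

-- ---- characterization of B ----
theorem pvB_dloop (ps : List Int) :
    (PySem.List.pyRange 0 ((ps.length : Int) - 1) 1).foldl (fun d t =>
      let a := PySem.List.pyGetD (pvOrd ps) t 0
      let b := PySem.List.pyGetD (pvOrd ps) (t + 1) 0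
      if PySem.List.pyGetD ps a 0 < PySem.List.pyGetD ps b 0 ∧ b < a then
        let loss := PySem.List.pyGetD ps b 0 - PySem.List.pyGetD ps a 0
        match d with
        | none => some loss
        | some m => if loss < m then some loss else d
      else d) none = pvMin (pvCands ps) := by
  have main : ∀ (L : List Int) (acc : Option Int),
      L.foldl (fun d t =>
        let a := PySem.List.pyGetD (pvOrd ps) t 0
        let b := PySem.List.pyGetD (pvOrd ps) (t + 1) 0
        if PySem.List.pyGetD ps a 0 < PySem.List.pyGetD ps b 0 ∧ b < a then
          let loss := PySem.List.pyGetD ps b 0 - PySem.List.pyGetD ps a 0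
          match d with
          | none => some loss
          | some m => if loss < m then some loss else d
        else d) acc =
      ((L.filter (fun t => decide (pvPrice ps (pvOrdAt ps t) < pvPrice ps (pvOrdAt ps (t + 1)) ∧
          pvOrdAt ps (t + 1) < pvOrdAt ps t))).map
        (fun t => pvPrice ps (pvOrdAt ps (t + 1)) - pvPrice ps (pvOrdAt ps t))).foldl
          pvMStep acc := by
    intro L
    induction L with
    | nil => intro acc; rfl
    | cons t L ih =>
      intro acc
      simp only [List.foldl_cons, List.filter_cons, decide_eq_true_eq]
      by_cases hc : pvPrice ps (pvOrdAt ps t) < pvPrice ps (pvOrdAt ps (t + 1)) ∧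
          pvOrdAt ps (t + 1) < pvOrdAt ps t
      · have hc' : PySem.List.pyGetD ps (PySem.List.pyGetD (pvOrd ps) t 0) 0 <
            PySem.List.pyGetD ps (PySem.List.pyGetD (pvOrd ps) (t + 1) 0) 0 ∧
            PySem.List.pyGetD (pvOrd ps) (t + 1) 0 < PySem.List.pyGetD (pvOrd ps) t 0 := hc
        rw [if_pos hc]
        simp only [List.map_cons, List.foldl_cons]
        have hstep : (if PySem.List.pyGetD ps (PySem.List.pyGetD (pvOrd ps) t 0) 0 <
              PySem.List.pyGetD ps (PySem.List.pyGetD (pvOrd ps) (t + 1) 0) 0 ∧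
              PySem.List.pyGetD (pvOrd ps) (t + 1) 0 < PySem.List.pyGetD (pvOrd ps) t 0 then
            match acc with
            | none => some (PySem.List.pyGetD ps (PySem.List.pyGetD (pvOrd ps) (t + 1) 0) 0 -
                PySem.List.pyGetD ps (PySem.List.pyGetD (pvOrd ps) t 0) 0)
            | some m => if PySem.List.pyGetD ps (PySem.List.pyGetD (pvOrd ps) (t + 1) 0) 0 -
                PySem.List.pyGetD ps (PySem.List.pyGetD (pvOrd ps) t 0) 0 < m then
                some (PySem.List.pyGetD ps (PySem.List.pyGetD (pvOrd ps) (t + 1) 0) 0 -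
                  PySem.List.pyGetD ps (PySem.List.pyGetD (pvOrd ps) t 0) 0)
              else acc
          else acc) =
            pvMStep acc (pvPrice ps (pvOrdAt ps (t + 1)) - pvPrice ps (pvOrdAt ps t)) := by
          rw [if_pos hc']
          cases acc <;> rfl
        rw [hstep]
        exact ih _
      · have hc' : ¬ (PySem.List.pyGetD ps (PySem.List.pyGetD (pvOrd ps) t 0) 0 <
            PySem.List.pyGetD ps (PySem.List.pyGetD (pvOrd ps) (t + 1) 0) 0 ∧
            PySem.List.pyGetD (pvOrd ps) (t + 1) 0 < PySem.List.pyGetD (pvOrd ps) t 0) := hc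
        rw [if_neg hc]
        have hstep : (if PySem.List.pyGetD ps (PySem.List.pyGetD (pvOrd ps) t 0) 0 <
              PySem.List.pyGetD ps (PySem.List.pyGetD (pvOrd ps) (t + 1) 0) 0 ∧
              PySem.List.pyGetD (pvOrd ps) (t + 1) 0 < PySem.List.pyGetD (pvOrd ps) t 0 then
            match acc with
            | none => some (PySem.List.pyGetD ps (PySem.List.pyGetD (pvOrd ps) (t + 1) 0) 0 -
                PySem.List.pyGetD ps (PySem.List.pyGetD (pvOrd ps) t 0) 0)
            | some m => if PySem.List.pyGetD ps (PySem.List.pyGetD (pvOrd ps) (t + 1) 0) 0 -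
                PySem.List.pyGetD ps (PySem.List.pyGetD (pvOrd ps) t 0) 0 < m then
                some (PySem.List.pyGetD ps (PySem.List.pyGetD (pvOrd ps) (t + 1) 0) 0 -
                  PySem.List.pyGetD ps (PySem.List.pyGetD (pvOrd ps) t 0) 0)
              else acc
          else acc) = acc := by
          rw [if_neg hc']
        rw [hstep]
        exact ih _
  exact main _ none

theorem pvB_char (ps : List Int) : find_min_loss_alt ps = (pvFm (pvLV ps)).map pvEnc := by
  have key : find_min_loss_alt ps =
      (match pvMin (pvCands ps) with
       | none => none
       | some dv => pvFindI ps (pvLast ps) dv (ps.length : Int)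
           (PySem.List.pyRange 0 (ps.length : Int) 1)) := by
    rw [← pvB_dloop ps]
    rfl
  rw [key]
  rcases hmin : pvMin (pvCands ps) with _ | dv
  · have hc : pvCands ps = [] := (pvMin_eq_none_iff _).mp hmin
    have hlv : pvLV ps = [] := by
      by_contra hne
      obtain ⟨e, he⟩ := List.exists_mem_of_ne_nil _ hne
      obtain ⟨c, hcm, _⟩ := pvExchange ps e he
      rw [hc] at hcm
      exact absurd hcm (List.not_mem_nil)
    rw [hlv]
    rfl
  · obtain ⟨hdm, hdmin⟩ := pvMin_min _ _ hmin
    obtain ⟨e', he', he'v⟩ := pvCands_sub ps dv hdm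
    have hne : pvLV ps ≠ [] := List.ne_nil_of_mem he'
    obtain ⟨e, he⟩ : ∃ e, pvFm (pvLV ps) = some e := by
      cases h : pvFm (pvLV ps) with
      | none => exact absurd ((pvFm_eq_none_iff _).mp h) hne
      | some e => exact ⟨e, rfl⟩
    rw [he]
    obtain ⟨hem, hemin⟩ := pvFm_min _ _ he
    have hdv_le : dv ≤ e.1 := by
      obtain ⟨c, hcm, hcle⟩ := pvExchange ps e hem
      exact le_trans (hdmin c hcm) hcle
    have he1 : e.1 = dv := le_antisymm (by rw [← he'v]; exact hemin e' he') hdv_le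
    obtain ⟨hval, hg1, hg2, hg3, hg4⟩ := (pvLV_mem ps e).mp hem
    have hpos : 0 < dv := by omega
    have htgt : pvPrice ps e.2.2 = pvPrice ps e.2.1 - dv := by omega
    have hmain : pvFindI ps (pvLast ps) dv (ps.length : Int)
        (PySem.List.pyRange 0 (ps.length : Int) 1) = some [e.2.1 + 1, e.2.2 + 1, dv] := by
      apply pvFindI_hit ps (pvLast ps) dv e.2.1 _ 0 hg1 (by omega) ?hprev ?hgrd ?hinn
      case hprev =>
        intro x hx0 hxi hg
        rw [pvGuard_iff ps _ x hx0] at hg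
        obtain ⟨j', hj1, hj2, hj3⟩ := hg
        have hmem' : (dv, (x, j')) ∈ pvLV ps := by
          rw [pvLV_mem]
          dsimp only
          refine ⟨by omega, hx0, hj1, hj2, by omega⟩
        rcases pvFm_lex_least ps e he _ hmem' (by dsimp only; omega) with hEq | hLex
        · rw [hEq] at hxi
          dsimp only at hxi
          omega
        · unfold pvLexLt at hLex
          dsimp only at hLex
          omega
      case hgrd =>
        rw [pvGuard_iff ps _ e.2.1 hg1]
        exact ⟨e.2.2, hg2, hg3, htgt⟩
      case hinn =>
        apply pvFindJ_hit ps _ e.2.1 dv e.2.2 (e.2.1 + 1) (by omega) hg3 htgt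
        intro x hx1 hx2 hxe
        have hmem' : (dv, (e.2.1, x)) ∈ pvLV ps := by
          rw [pvLV_mem]
          dsimp only
          refine ⟨by omega, hg1, by omega, by omega, by omega⟩
        rcases pvFm_lex_least ps e he _ hmem' (by dsimp only; omega) with hEq | hLex
        · rw [hEq] at hx2
          dsimp only at hx2
          omega
        · unfold pvLexLt at hLex
          dsimp only at hLex
          omega
    dsimp only
    rw [hmain]
    simp [pvEnc, he1]

-- ===== VERDICT (by name: the statement is the Claim_ definition above) =====
theorem find_min_loss_spec : Claim_equal_find_min_loss := by
  intro prices _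
  unfold Spec_find_min_loss
  rw [pvA_char, pvB_char]
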